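-- pv_equiv track=rewrite | github.com/tdolan0816/QuillArrow-ClioBatchLoadingTemplates | mass_update_templates.py | _find_run_index
-- ===== SOURCE A (Python) =====
-- from typing import Iterable, List, Tuple
--
-- def _find_run_index(run_spans: List[Tuple[int, int]], position: int) -> int:
--     for idx, (start, end) in enumerate(run_spans):
--         if start <= position < end:
--             return idx
--     for idx in range(len(run_spans) - 1, -1, -1):
--         if run_spans[idx][0] != run_spans[idx][1]:
--             return idx
--     return 0
-- ===== SOURCE B (Python) =====
-- from typing import List, Tuple
--
-- def _find_run_index(run_spans: List[Tuple[int, int]], position: int) -> int: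
--     last_nonempty = None
--     for idx, (start, end) in enumerate(run_spans):
--         if start <= position < end:
--             return idx
--         if start != end:
--             last_nonempty = idx
--     return last_nonempty if last_nonempty is not None else 0
-- ===== Notes on version B (the rewrite author's own statement) =====
-- stated objective: simpler
-- what changed: Replaces A's two sequential scans (forward containment search, then a backward indexed scan for the last non-empty span) with a single forward pass that tracks the last non-empty index while searching for containment.
import Mathlib
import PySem

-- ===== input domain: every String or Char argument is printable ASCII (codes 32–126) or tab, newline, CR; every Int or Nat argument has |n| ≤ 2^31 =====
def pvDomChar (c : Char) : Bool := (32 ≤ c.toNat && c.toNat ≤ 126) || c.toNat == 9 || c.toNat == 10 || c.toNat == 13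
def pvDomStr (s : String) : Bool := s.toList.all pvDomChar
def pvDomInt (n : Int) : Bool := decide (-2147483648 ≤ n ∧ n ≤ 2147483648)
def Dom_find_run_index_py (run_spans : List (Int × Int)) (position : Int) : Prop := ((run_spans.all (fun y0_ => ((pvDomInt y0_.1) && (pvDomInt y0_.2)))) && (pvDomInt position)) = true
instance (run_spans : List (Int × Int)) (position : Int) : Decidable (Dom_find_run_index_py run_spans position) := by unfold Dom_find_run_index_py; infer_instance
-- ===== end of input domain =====

-- B replaces A's two sequential scans by ONE forward pass that also tracks the last non-empty index (simpler decomposition, same O(n) cost).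

-- ===== PORT A =====
-- first loop: 'for idx, (start, end) in enumerate(run_spans): if start <= position < end: return idx'
def pvALoop1 (position : Int) : List (Int × Int) → Int → Option Int
  | [], _ => none
  | (s, e) :: rest, idx =>
    if s ≤ position ∧ position < e then some idx else pvALoop1 position rest (idx + 1)

-- second loop: 'for idx in range(len(run_spans)-1, -1, -1): …'; k+1 ↦ current idx = k, counting down; 0 ↦ loop exhausted, 'return 0'
def pvALoop2 (run_spans : List (Int × Int)) : Nat → Int
  | 0 => 0
  | k + 1 =>
    match PySem.List.pyGet? run_spans (k : Int) with
    | some (s, e) => if s ≠ e then (k : Int) else pvALoop2 run_spans k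
    | none => pvALoop2 run_spans k   -- unreachable: k < len

def find_run_index_py (run_spans : List (Int × Int)) (position : Int) : Int :=
  match pvALoop1 position run_spans 0 with
  | some i => i
  | none => pvALoop2 run_spans run_spans.length

-- ===== PORT B =====
def pvBLoop (position : Int) : List (Int × Int) → Int → Option Int → Int
  | [], _, last => last.getD 0
  | (s, e) :: rest, idx, last =>
    if s ≤ position ∧ position < e then idx
    else pvBLoop position rest (idx + 1) (if s ≠ e then some idx else last)

def find_run_index_py_alt (run_spans : List (Int × Int)) (position : Int) : Int :=
  pvBLoop position run_spans 0 none

-- ===== PRECONDITION & SPEC =====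
def Spec_find_run_index_py (run_spans : List (Int × Int)) (position : Int) (out : Int) : Prop := out = find_run_index_py_alt run_spans position
instance (run_spans : List (Int × Int)) (position : Int) (out : Int) : Decidable (Spec_find_run_index_py run_spans position out) := by unfold Spec_find_run_index_py; infer_instance

-- ===== CLAIM (what is proved, stated in full; the proofs are below) =====
def Claim_equal_find_run_index_py : Prop := ∀ (run_spans : List (Int × Int)) (position : Int), Dom_find_run_index_py run_spans position → Spec_find_run_index_py run_spans position (find_run_index_py run_spans position)

-- ===== LEMMAS AND PROOFS =====

-- forward accumulation of the last non-empty index (proof-side characterisation)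
def pvLastNE : List (Int × Int) → Int → Option Int → Option Int
  | [], _, last => last
  | (s, e) :: rest, idx, last => pvLastNE rest (idx + 1) (if s ≠ e then some idx else last)

theorem pvBLoop_eq (position : Int) :
    ∀ (suf : List (Int × Int)) (idx : Int) (last : Option Int),
      pvBLoop position suf idx last =
        match pvALoop1 position suf idx with
        | some i => i
        | none => (pvLastNE suf idx last).getD 0 := by
  intro suf
  induction suf with
  | nil => intro idx last; simp [pvBLoop, pvALoop1, pvLastNE]
  | cons hd tl ih =>
    intro idx last
    obtain ⟨s, e⟩ := hd
    by_cases h : s ≤ position ∧ position < e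
    · simp [pvBLoop, pvALoop1, pvLastNE, h]
    · simp [pvBLoop, pvALoop1, pvLastNE, h, ih]

theorem pvLastNE_snoc (xs : List (Int × Int)) (s e : Int) :
    ∀ (idx : Int) (last : Option Int),
      pvLastNE (xs ++ [(s, e)]) idx last =
        if s ≠ e then some (idx + xs.length) else pvLastNE xs idx last := by
  induction xs with
  | nil => intro idx last; simp [pvLastNE]
  | cons hd tl ih =>
    intro idx last
    obtain ⟨a, b⟩ := hd
    simp only [List.cons_append, pvLastNE, ih]
    split_ifs <;> simp <;> ring_nf

theorem pvALoop2_append (xs ys : List (Int × Int)) :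
    ∀ (k : Nat), k ≤ xs.length → pvALoop2 (xs ++ ys) k = pvALoop2 xs k := by
  intro k
  induction k with
  | zero => intro _; simp [pvALoop2]
  | succ n ih =>
    intro h
    have hn : n < xs.length := by omega
    have hget : PySem.List.pyGet? (xs ++ ys) (n : Int) = PySem.List.pyGet? xs (n : Int) := by
      simp [PySem.List.pyGet?_natCast, List.getElem?_append_left hn]
    simp only [pvALoop2, hget]
    rcases hx : PySem.List.pyGet? xs (n : Int) with _ | ⟨s, e⟩
    · simp only; exact ih (by omega)
    · simp only
      split_ifs with hse
      · rfl
      · exact ih (by omega)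

theorem pvALoop2_eq (rs : List (Int × Int)) :
    pvALoop2 rs rs.length = (pvLastNE rs 0 none).getD 0 := by
  induction rs using List.reverseRecOn with
  | nil => simp [pvALoop2, pvLastNE]
  | append_singleton xs x ih =>
    obtain ⟨s, e⟩ := x
    have hlen : (xs ++ [(s, e)]).length = xs.length + 1 := by simp
    rw [hlen]
    have hget : PySem.List.pyGet? (xs ++ [(s, e)]) (xs.length : Int) = some (s, e) :=
      PySem.List.pyGet?_append_length (pre := xs) (y := (s, e)) (ys := [])
    simp only [pvALoop2, hget, pvLastNE_snoc]
    split_ifs with hse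
    · simp
    · rw [pvALoop2_append xs [(s, e)] xs.length (le_refl _), ih]

-- ===== VERDICT (by name: the statement is the Claim_ definition above) =====
theorem find_run_index_py_spec : Claim_equal_find_run_index_py := by
  intro rs pos _
  unfold Spec_find_run_index_py find_run_index_py find_run_index_py_alt
  rw [pvBLoop_eq]
  rcases h : pvALoop1 pos rs 0 with _ | i
  · simp [pvALoop2_eq]
  · rfl
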